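/- GENERATED by tools/from_farm_form.py from prooffarm-gif/accepted/DGifDecreaseImageCounter.1/Proof.lean (a worked proof of the farm's unit `DGifDecreaseImageCounter.1`,
   accepted by the verdict) — do not edit. -/
import Gif.Spec.Units.DGifDecreaseImageCounter_1
import Gif.Spec.AllSegs
import Gif.Spec.Proved.DGifDecreaseImageCounter_1_Lemmas

/-!
  `DGifDecreaseImageCounter.1` (10A460H … 10A4B1H, 22 instructions; dgif_lib.c:1156-1160): from the entry of
  `DGifDecreaseImageCounter` to the cut `AfterRaster` behind `free(sp->RasterBits)`.

      entry ─ push rbp, push rbx, sub rsp 8 ─ check ─ ebp = --gif.ImageCount (store) ─ check ─ rbp = &gif.SavedImages[ImageCount]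
            ─ check ─ rdi = rbp->RasterBits ─┬─ NULL ───────────────────────────┬─ 10A4B1H  `AfterRaster` (heap `H`)
                                             └─ free(rdi) ─ ret4 = 10A4B1H ──────┘           `AfterRaster` (heap `H.release raster`)

  The pure part is in Lemmas.lean: `dic1_entry_facts` (what the precondition says), `dic1_after_store` (the state invariant of
  the forest without the dropped image after the store `ImageCount--`), `dic1_after_free` (the same through `free`'s footprint).
  One walk to the third check (where the slot's address gets its numeric form), then one walk per arm of the NULL test.
-/

open X86 X86.User Asan ProgX.Base ProgX.Base.Spec Gif.Spec

set_option maxRecDepth 4000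
set_option maxHeartbeats 4000000

/-- Segment 1 of `DGifDecreaseImageCounter`: the prologue, `ImageCount--`, `free` of the dropped slot's raster (if any); the exit
assertion `AfterRaster` at 10A4B1H holds for the heap `H` (no raster) or `H.release raster`. -/
theorem Gif.Spec.Proved.DGifDecreaseImageCounter_1_ok : Gif.Spec.DGifDecreaseImageCounter_1.Statement := by
  intro Lay hLay μ hμ u₀ hcode h_free h_load4 h_load8 H rest frames F R init g e ret he hpre
  -- THE PRELUDE: the entry's facts (`he_align`, `he_room`, `he_top`, `he_retAddr` …), the precondition
  have he0 := he
  have hpre0 := hpre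
  v_entry he
  obtain ⟨henv, hrdi, himgs, hgext⟩ := hpre
  have hp := henv.heap
  have hok := henv.ok
  have hbase := hp.base
  have hlimit := hp.limit
  -- the array `s` of the forest, its last slot (the dropped image `g`), where gif and the array are (numbers)
  obtain ⟨s, hsaved, hsimgs, hcap, k_arr, k_cnt, himg, hg1, hg2, ha1, ha2, hfar⟩ :=
    Gif.Spec.DGifDecreaseImageCounter_1.dic1_entry_facts henv himgs
  have hn31 : init.length + 1 < 2 ^ 31 := by omega
  -- the loads of `gif.ImageCount` and `gif.SavedImages`, as facts about the entry memory in the walker's form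
  have l_cnt : e.mem.readLE (e.reg .rdi + 0x20) 4 = init.length + 1 := by
    rw [rd_eq_readLE e.mem (e.reg .rdi + 0x20) (F.gif + 32) 4 (by u_omega)]
    exact k_cnt
  have l_arr : e.mem.readLE (e.reg .rdi + 0x48) 8 = s.arr := by
    rw [rd_eq_readLE e.mem (e.reg .rdi + 0x48) (F.gif + 72) 8 (by u_omega)]
    exact k_arr
  have hglive : LiveIn (H.liveObjs ++ rest) frames F.gif 120 :=
    hok.gif_live.liveIn rest frames (Nat.le_refl _) (Nat.le_refl _)
  -- WALK 1: 0x10a460 (l.1156) … 0x10a49e (l.1158): the prologue, `ImageCount--`, the address of the dropped slot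
  u_walk hcode [hμ.vendor] until [Gif.L.DGifDecreaseImageCounter.chk3] span [ProgX.Base.L.textLo, ProgX.Base.L.textHi] side (v_side)
  case check_10a46d =>
    -- 0x10a46d (l.1157): the load of `gif.ImageCount` lies inside the live object gif
    have hun : ShadowUntouched e.mem s_10a46d.mem := by v_untouched
    exact hglive.accSmall hp.inv.shadow hun _ 4 (by decide) (by u_omega) (by u_omega)
  case check_10a47f =>
    -- 0x10a47f (l.1158): the load of `gif.SavedImages` lies inside the live object gif
    have hun : ShadowUntouched e.mem s_10a47f.mem := by v_untouched
    exact hglive.accSmall hp.inv.shadow hun _ 8 (by decide) (by u_omega) (by u_omega)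
  -- 0x10a49e (chk3): the count is `init.length`, the slot's address is `s.arr + 56 · init.length`: as numbers
  rw [Gif.Spec.DGifDecreaseImageCounter_1.dic1_dec32, cnt32_sext_bv _ (by omega),
    Gif.Spec.DGifDecreaseImageCounter_1.dic1_slot] at w_rbp w_rdi
  rw [Gif.Spec.DGifDecreaseImageCounter_1.dic1_dec32, cnt32_sext_bv _ (by omega)] at w_rax
  rw [Gif.Spec.DGifDecreaseImageCounter_1.dic1_dec32, toNat_ofNat32 _ (by omega)] at w_mem
  have hras := himg.raster
  -- the array is live: the third check
  have halive : LiveIn (H.liveObjs ++ rest) frames s.arr (56 * s.cap) := by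
    have hamem : (s.arr, 56 * s.cap) ∈ F.owned := by
      apply Forest.mem_owned_saved
      rw [hsaved]
      exact List.mem_cons_self
    exact (hok.owns.live _ hamem).liveIn rest frames (Nat.le_refl _) (Nat.le_refl _)
  cases hr : g.raster with
  | none =>
    -- THE DROPPED IMAGE HAS NO RASTER: `RasterBits = NULL`, the `je` at 0x10a4aa is taken
    rw [hr] at hras
    simp only [RasterAt, gfield] at hras
    have l_ras : e.mem.readLE (UInt64.ofNat (s.arr + 56 * init.length) + 32) 8 = 0 := by
      rw [rd_eq_readLE e.mem _ (s.arr + 56 * init.length + 32) 8 (by u_omega)]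
      exact hras
    -- WALK 2a: 0x10a49e … 0x10a4b1 (l.1158)
    u_walk hcode [hμ.vendor] until [Gif.L.DGifDecreaseImageCounter.at_10a4b1] span [ProgX.Base.L.textLo, ProgX.Base.L.textHi] side (v_side)
    case check_10a49e =>
      -- 0x10a49e (l.1158): the load of the slot's `RasterBits` lies inside the live array (`length ≤ cap`)
      have hun : ShadowUntouched e.mem s_10a49e.mem := by v_untouched
      exact halive.accSmall hp.inv.shadow hun _ 8 (by decide) (by u_omega) (by u_omega)
    -- 0x10a4b1 (the cut, l.1161): the function's footprint so far is its stack and `gif.ImageCount`, which holds `init.length`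
    have hsame2 : Mem.SameExcept [⟨(e.reg .rsp).toNat - 176, (e.reg .rsp).toNat⟩, ⟨F.gif + 32, F.gif + 36⟩] e.mem s_10a4aa.mem := by
      rw [w_mem]
      u_same
    have hun : ShadowUntouched e.mem s_10a4aa.mem := by v_untouched
    have hcnt : rd s_10a4aa.mem (F.gif + 32) 4 = init.length := by
      rw [← rd_eq_readLE s_10a4aa.mem (e.reg .rdi + 32) (F.gif + 32) 4 (by u_omega), w_mem]
      u_read
    obtain ⟨hinv', hshape', himg', hrem'⟩ := Gif.Spec.DGifDecreaseImageCounter_1.dic1_after_store henv hsaved hsimgs hsame2 hun hcnt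
      he_align he_room he_top
    -- the exit assertion, for the heap `H`
    refine ReachVia.done ⟨s, H, ?_⟩
    exact {
      entry := he0
      pre := hpre0
      saved := hsaved
      imgs := hsimgs
      rip := w_rip
      rsp := w_rsp
      rbx := w_rbx
      r12 := w_kept.get .r12 rfl
      r13 := w_kept.get .r13 rfl
      r14 := w_kept.get .r14 rfl
      r15 := w_kept.get .r15 rfl
      slot_rbp := by
        rw [w_mem]
        u_read
      slot_rbx := by
        rw [w_mem]
        u_read
      slot_ra := by
        u_frame he_retAddr
      region := SameRegion.refl H
      inv := hinv'
      shape := hshape'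
      owns := by
        have hperm := DGifDecreaseImageCounter.owned_dropped F s init g hsaved hsimgs hgext
        rw [hr] at hperm
        exact hok.owns.perm hperm
      cm := himg'.cm
      rem := hrem'
      same := by
        rw [w_mem]
        u_same
      code := ProgX.Base.conv_code_in w_eq
      abi := by v_inv
    }
  | some r =>
    -- THE DROPPED IMAGE HAS THE RASTER `r`: `RasterBits = r.1`, not NULL: `free(r.1)`
    rw [hr] at hras
    simp only [RasterAt, gfield] at hras
    have hras1 := hras.1
    clear hras
    -- the raster is owned besides the colour map and the forest without the dropped image
    have hperm := DGifDecreaseImageCounter.owned_dropped F s init g hsaved hsimgs hgext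
    rw [hr] at hperm
    have hown1 : Owns H ((r.1, r.2) :: (Map.objs g.cm ++ (DGifDecreaseImageCounter.dropped F s init).owned)) :=
      hok.owns.perm hperm
    have hrlive : H.Live r.1 r.2 := hown1.of_cons.1
    have hrin := hown1.inside hp.inv.heap (o := (r.1, r.2)) List.mem_cons_self
    simp only at hrin
    rw [hbase] at hrin
    have hr1 := hrin.1
    have hr2 := hrin.2.2.2.2
    clear hrin
    have l_ras : e.mem.readLE (UInt64.ofNat (s.arr + 56 * init.length) + 32) 8 = r.1 := by
      rw [rd_eq_readLE e.mem _ (s.arr + 56 * init.length + 32) 8 (by u_omega)]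
      exact hras1
    have hfree := h_free H rest frames r.2
    -- WALK 2b: 0x10a49e … the return of `free` at 0x10a4b1 (l.1158-1159)
    u_walk hcode [hμ.vendor] until [Gif.L.DGifDecreaseImageCounter.at_10a4b1] span [ProgX.Base.L.textLo, ProgX.Base.L.textHi] side (v_side)
    case check_10a49e =>
      -- 0x10a49e (l.1158): the load of the slot's `RasterBits` lies inside the live array (`length ≤ cap`)
      have hun : ShadowUntouched e.mem s_10a49e.mem := by v_untouched
      exact halive.accSmall hp.inv.shadow hun _ 8 (by decide) (by u_omega) (by u_omega)
    case call_inv =>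
      v_inv
    case pre_10a4ac =>
      -- 0x10a4ac (l.1159) `free(sp->RasterBits)`: the heap's invariant under the function's frame (`dic1_after_store`); the raster is live
      have hsame2 : Mem.SameExcept [⟨(e.reg .rsp).toNat - 176, (e.reg .rsp).toNat⟩, ⟨F.gif + 32, F.gif + 36⟩] e.mem s_10a4ac.mem := by
        rw [w_mem]
        u_same
      have hun : ShadowUntouched e.mem s_10a4ac.mem := by v_untouched
      have hcnt : rd s_10a4ac.mem (F.gif + 32) 4 = init.length := by
        rw [← rd_eq_readLE s_10a4ac.mem (e.reg .rdi + 32) (F.gif + 32) 4 (by u_omega), w_mem]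
        u_read
      obtain ⟨hinv', _, _, _⟩ := Gif.Spec.DGifDecreaseImageCounter_1.dic1_after_store henv hsaved hsimgs hsame2 hun hcnt
        he_align he_room he_top
      have e8 : (s_10a4ac.reg .rsp).toNat + 8 = (e.reg .rsp).toNat - 24 := by
        rw [w_rsp]
        u_omega
      refine ⟨⟨?_, hbase, hlimit, hp.text, hp.offText⟩, Or.inr ?_⟩
      · rw [e8]
        exact hinv'
      · rw [w_rdi, toNat_ofNat_addr r.1 (by omega)]
        exact hrlive
    -- 0x10a4b1 (ret4 = the cut, l.1161): `free` has returned, the heap is `H.release r.1`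
    have hc64 : (UInt64.ofNat r.1).toNat = r.1 := toNat_ofNat_addr r.1 (by omega)
    have hne1 : (s_10a4ac.reg .rdi).toNat ≠ 0 := by
      rw [w_rdi_10a4ac, hc64]
      omega
    have hinv1 := w_post.2 hne1
    rw [w_rdi_10a4ac, hc64] at hinv1
    clear w_post
    have e8 : (s_10a4ac.reg .rsp).toNat + 8 = (e.reg .rsp).toNat - 24 := by
      rw [w_rsp_10a4ac]
      u_omega
    rw [e8] at hinv1
    -- the state at `free`'s entry: the function's footprint so far is its stack and `gif.ImageCount`, which holds `init.length`
    have hsame2 : Mem.SameExcept [⟨(e.reg .rsp).toNat - 176, (e.reg .rsp).toNat⟩, ⟨F.gif + 32, F.gif + 36⟩] e.mem s_10a4ac.mem := by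
      rw [w_mem_10a4ac]
      u_same
    have hun2 : ShadowUntouched e.mem s_10a4ac.mem := by
      rw [w_mem_10a4ac]
      v_untouched
    have hcnt : rd s_10a4ac.mem (F.gif + 32) 4 = init.length := by
      rw [← rd_eq_readLE s_10a4ac.mem (e.reg .rdi + 32) (F.gif + 32) 4 (by u_omega), w_mem_10a4ac]
      u_read
    obtain ⟨hinv', hshape', himg', hrem'⟩ := Gif.Spec.DGifDecreaseImageCounter_1.dic1_after_store henv hsaved hsimgs hsame2 hun2 hcnt
      he_align he_room he_top
    -- through `free`'s footprint (24 bytes of stack, the header's state word, the raster's shadow): `dic1_after_free`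
    have w_same0 := w_same
    simp only [X86.User.Spec.footprint, vspec, shadowSpan, w_rsp_10a4ac, w_rdi_10a4ac, hc64] at w_same0
    have e32 : (e.reg .rsp - 32).toNat = (e.reg .rsp).toNat - 32 := by u_omega
    rw [e32] at w_same0
    have hfsame := Gif.Spec.DGifDecreaseImageCounter_1.dic1_widen (a' := (e.reg .rsp).toNat - 176) (b' := (e.reg .rsp).toNat)
      w_same0 (by omega) (by omega)
    obtain ⟨hshape2, hcm2, hrem2, hown2⟩ := Gif.Spec.DGifDecreaseImageCounter_1.dic1_after_free henv hinv' hshape' himg'.cm hown1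
      hcap hfsame he_room he_top
    clear w_same0 hfsame e32
    -- the saved registers' slots and the return address, through `free`'s footprint; then the segment's own footprint
    v_after_call w_rsp_10a4ac w_mem_10a4ac
    simp only [shadowSpan, w_rdi_10a4ac, hc64] at w_same
    have hpbp : s_10a4ac.mem.readLE (e.reg .rsp - 8) 8 = (e.reg .rbp).toNat := by
      rw [w_mem_10a4ac]
      u_read
    rw [w_mem_10a4ac] at hpbp
    have hsbp : s_10a4acr.mem.readLE (e.reg .rsp - 8) 8 = (e.reg .rbp).toNat := by u_frame hpbp
    have hpbx : s_10a4ac.mem.readLE (e.reg .rsp - 16) 8 = (e.reg .rbx).toNat := by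
      rw [w_mem_10a4ac]
      u_read
    rw [w_mem_10a4ac] at hpbx
    have hsbx : s_10a4acr.mem.readLE (e.reg .rsp - 16) 8 = (e.reg .rbx).toNat := by u_frame hpbx
    have hsra : UInt64.ofNat (s_10a4acr.mem.readLE (e.reg .rsp) 8) = ret := by u_frame he_retAddr
    have hsame3 : Mem.SameExcept [⟨(e.reg .rsp).toNat - 176, (e.reg .rsp).toNat⟩, ⟨0x800000, 0x1000020⟩] e.mem s_10a4acr.mem := by
      u_same
    -- the exit assertion, for the heap `H.release r.1`
    refine ReachVia.done ⟨s, H.release r.1, ?_⟩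
    exact {
      entry := he0
      pre := hpre0
      saved := hsaved
      imgs := hsimgs
      rip := w_rip
      rsp := w_rsp
      rbx := w_rbx
      r12 := w_kept.get .r12 rfl
      r13 := w_kept.get .r13 rfl
      r14 := w_kept.get .r14 rfl
      r15 := w_kept.get .r15 rfl
      slot_rbp := hsbp
      slot_rbx := hsbx
      slot_ra := hsra
      region := SameRegion.release H r.1
      inv := hinv1
      shape := hshape2
      owns := hown2
      cm := hcm2
      rem := hrem2.trans hrem'
      same := hsame3
      code := w_code
      abi := w_inv
    }
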